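-- pv_equiv track=rewrite | github.com/Rachel-3/2024-Algorithm-Study | chaerim/Programmers/Level_0/Lv0_1로_만들기.py | solution
-- ===== SOURCE A (Python) =====
-- def solution(num_list):
--     answer = 0
--
--     for num in num_list:
--         while num > 1:
--             if num%2 ==0:
--                 num = num//2
--             elif num%2 != 0:
--                 num = (num-1)//2
--             answer += 1
--
--     return answer
-- ===== SOURCE B (Python) =====
-- def solution(num_list):
--     # Closed form: halving a number num>1 down to 1 takes exactly
--     # num.bit_length()-1 steps; numbers <= 1 take 0 steps.
--     return sum(num.bit_length() - 1 for num in num_list if num > 1)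
-- ===== Notes on version B (the rewrite author's own statement) =====
-- stated objective: faster
-- what changed: Replaces the per-element halving while-loop with the closed form bit_length()-1 summed in one pass.
import Mathlib
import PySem

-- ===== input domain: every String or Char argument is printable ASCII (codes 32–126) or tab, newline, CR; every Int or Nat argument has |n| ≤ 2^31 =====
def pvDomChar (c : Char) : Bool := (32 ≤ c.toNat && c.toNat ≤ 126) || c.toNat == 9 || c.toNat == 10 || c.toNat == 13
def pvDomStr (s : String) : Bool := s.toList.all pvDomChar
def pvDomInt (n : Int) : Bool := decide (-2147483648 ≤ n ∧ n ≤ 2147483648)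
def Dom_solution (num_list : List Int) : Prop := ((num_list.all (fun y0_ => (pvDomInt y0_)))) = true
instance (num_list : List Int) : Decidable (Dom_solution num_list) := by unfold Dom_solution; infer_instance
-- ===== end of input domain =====

-- B replaces A's per-element halving while-loop with the closed form bit_length()-1 (intended as faster — one pass, no inner halving loop; measured up to ~16× at n=262144 on one timing-probe family, unconfirmed on another).

-- ===== PORT A =====
-- the inner 'while num > 1' loop of A, carrying 'answer'
def solutionLoop (num answer : Int) : Int :=
  if h : num > 1 then
    solutionLoop
      (if PySem.Int.mod num 2 = 0 then PySem.Int.floordiv num 2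
       else if PySem.Int.mod num 2 ≠ 0 then PySem.Int.floordiv (num - 1) 2 else num)
      (answer + 1)
  else answer
termination_by num.toNat
decreasing_by
  have h2 : (0:Int) < 2 := by norm_num
  have b2 := (PySem.Int.floordiv_lt_iff_lt_mul (a := num) (b := 2) (q := num) h2).mpr (by omega)
  have b4 := (PySem.Int.floordiv_lt_iff_lt_mul (a := num - 1) (b := 2) (q := num) h2).mpr (by omega)
  split_ifs <;> omega

def solution (num_list : List Int) : Int :=
  num_list.foldl (fun answer num => solutionLoop num answer) 0

-- ===== PORT B =====
def solution_alt (num_list : List Int) : Int :=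
  num_list.foldl
    (fun acc num => if num > 1 then acc + ((PySem.Int.bitLength num : Int) - 1) else acc) 0

-- ===== PRECONDITION & SPEC =====
def Spec_solution (num_list : List Int) (out : Int) : Prop := out = solution_alt num_list
instance (num_list : List Int) (out : Int) : Decidable (Spec_solution num_list out) := by unfold Spec_solution; infer_instance

-- ===== CLAIM (what is proved, stated in full; the proofs are below) =====
def Claim_equal_solution : Prop := ∀ (num_list : List Int), Dom_solution num_list → Spec_solution num_list (solution num_list)

-- ===== LEMMAS AND PROOFS =====

-- one whole inner while-loop equals the bit_length closed form
theorem solutionLoop_eq (num answer : Int) :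
    solutionLoop num answer =
      answer + (if num > 1 then (PySem.Int.bitLength num : Int) - 1 else 0) := by
  generalize hk : num.toNat = k
  induction k using Nat.strong_induction_on generalizing num answer with
  | _ k ih =>
    by_cases h : num > 1
    · -- the next value of num is floordiv num 2 in both branches
      have hodd : PySem.Int.mod num 2 ≠ 0 →
          PySem.Int.floordiv (num - 1) 2 = PySem.Int.floordiv num 2 := by
        intro hm
        have hq := PySem.Int.floordiv_mul_add_mod num 2
        have hr := PySem.Int.mod_two_eq num
        rw [PySem.Int.floordiv_eq_iff_of_pos (by norm_num)]
        constructor <;> omega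
      have hstep : solutionLoop num answer =
          solutionLoop (PySem.Int.floordiv num 2) (answer + 1) := by
        rw [solutionLoop, dif_pos h]
        by_cases hm : PySem.Int.mod num 2 = 0
        · rw [if_pos hm]
        · rw [if_neg hm, if_pos hm, hodd hm]
      set fd := PySem.Int.floordiv num 2 with hfd
      have h2 : (0:Int) < 2 := by norm_num
      have b1 := (PySem.Int.le_floordiv_iff_mul_le (a := num) (b := 2) (q := 1) h2).mpr (by omega)
      have b2 := (PySem.Int.floordiv_lt_iff_lt_mul (a := num) (b := 2) (q := num) h2).mpr (by omega)
      have hbl : PySem.Int.bitLength num = PySem.Int.bitLength fd + 1 :=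
        PySem.Int.bitLength_of_pos (by omega)
      have hlt : fd.toNat < k := by omega
      rw [hstep, ih fd.toNat hlt fd (answer + 1) rfl]
      by_cases hfd1 : fd > 1
      · simp only [h, hfd1, if_true]
        push_cast [hbl]; ring
      · -- fd = 1, so num ∈ {2,3} and bitLength num = 2
        have : fd = 1 := by omega
        have h1 : PySem.Int.bitLength (1 : Int) = 1 := by decide
        simp only [h, hfd1, if_true, if_false]
        rw [this] at hbl
        rw [hbl, h1]; push_cast; ring
    · rw [solutionLoop]
      simp [h]

theorem solution_eq_alt (num_list : List Int) : solution num_list = solution_alt num_list := by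
  unfold solution solution_alt
  induction num_list using List.reverseRecOn with
  | nil => rfl
  | append_singleton xs x ih =>
      rw [List.foldl_append, List.foldl_append, ih, List.foldl_cons, List.foldl_nil,
        List.foldl_cons, List.foldl_nil, solutionLoop_eq]
      by_cases hx : x > 1 <;> simp [hx]

theorem solution_spec : Claim_equal_solution := by
  intro num_list _
  exact solution_eq_alt num_list
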